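-- pv_equiv track=rewrite | github.com/kostofranca/qriptos | QLib.py | vector_rep
-- ===== SOURCE A (Python) =====
-- def vector_rep(binary):
--     """
--     Given a binary number in str form returns the vector represantation of it.
--     """
--     def tensor(I,J):
--         result = []
--         for i in I:
--             for j in J:
--                 result.append(i*j)
--         return result
--
--     result = [1,0] # zero
--     if (binary[0] == "1"):
--         result = [0,1]
--
--     for i in range(1,len(binary)):
--         if (binary[i] == "0"):
--             result = tensor(result,[1,0])
--         else:
--             result = tensor(result,[0,1])
--     return result
-- ===== SOURCE B (Python) =====
-- def vector_rep(binary):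
--     """
--     Given a binary number in str form returns the vector represantation of it.
--     One-pass: compute the index of the sole 1 entry, then build the vector directly.
--     """
--     idx = 1 if binary[0] == "1" else 0
--     for c in binary[1:]:
--         idx = 2 * idx + (0 if c == "0" else 1)
--     vec = [0] * (2 ** len(binary))
--     vec[idx] = 1
--     return vec
-- ===== Notes on version B (the rewrite author's own statement) =====
-- stated objective: alternative
-- what changed: Instead of building the 2^n vector by repeated tensor products (rebuilding a doubling list at each character), B computes the one-hot index by a single arithmetic pass over the string and writes a single 1 into a zero vector.
import Mathlib
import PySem

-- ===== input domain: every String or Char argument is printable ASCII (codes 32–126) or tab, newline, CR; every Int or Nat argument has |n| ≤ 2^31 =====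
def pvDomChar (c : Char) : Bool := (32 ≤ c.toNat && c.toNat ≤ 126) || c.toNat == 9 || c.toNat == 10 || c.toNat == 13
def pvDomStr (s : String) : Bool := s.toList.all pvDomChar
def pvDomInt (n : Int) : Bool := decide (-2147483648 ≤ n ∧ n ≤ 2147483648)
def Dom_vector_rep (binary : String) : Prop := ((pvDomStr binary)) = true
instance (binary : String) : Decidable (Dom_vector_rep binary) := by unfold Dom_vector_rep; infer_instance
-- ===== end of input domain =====

-- B replaces A's repeated tensor-product construction by one arithmetic pass computing
-- the one-hot index, then a single write into a zero vector.

-- ===== PORT A =====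
-- inner helper 'tensor(I, J)' of A: nested loops appending i*j
def pvTensor (I J : List Int) : List Int :=
  I.foldl (fun result i => J.foldl (fun result j => result ++ [i*j]) result) []

def vector_rep (binary : String) : List Int :=
  let cs := binary.toList
  -- binary[0]: in range under Pre_ (binary ≠ ""), so pyGetD is exact here
  let result : List Int := if PySem.List.pyGetD cs 0 ' ' = '1' then [0, 1] else [1, 0]
  (PySem.List.pyRange 1 (PySem.Chars.len cs) 1).foldl
    (fun result i =>
      if PySem.List.pyGetD cs i ' ' = '0' then pvTensor result [1, 0]
      else pvTensor result [0, 1])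
    result

-- ===== PORT B =====
def vector_rep_alt (binary : String) : List Int :=
  let cs := binary.toList
  -- binary[0]: in range under Pre_ (binary ≠ ""), so pyGetD is exact here
  let idx0 : Int := if PySem.List.pyGetD cs 0 ' ' = '1' then 1 else 0
  let idx : Int := (PySem.List.slice cs (some 1) none).foldl
    (fun idx c => 2 * idx + (if c = '0' then 0 else 1)) idx0
  -- vec = [0] * (2 ** len(binary)); vec[idx] = 1 (idx is always in range, pySetD is exact)
  PySem.List.pySetD (List.replicate (2 ^ cs.length) (0 : Int)) idx 1

-- ===== PRECONDITION & SPEC =====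
-- Pre_ excludes only the empty string, on which both Pythons raise IndexError at binary[0].
def Pre_vector_rep (binary : String) : Prop := binary ≠ ""
instance (binary : String) : Decidable (Pre_vector_rep binary) := by unfold Pre_vector_rep; infer_instance
def pvWitness_vector_rep : String := "10"

def Spec_vector_rep (binary : String) (out : List Int) : Prop := out = vector_rep_alt binary
instance (binary : String) (out : List Int) : Decidable (Spec_vector_rep binary out) := by unfold Spec_vector_rep; infer_instance

-- ===== CLAIM (what is proved, stated in full; the proofs are below) =====
def Claim_equal_vector_rep : Prop := ∀ (binary : String), Dom_vector_rep binary → Pre_vector_rep binary → Spec_vector_rep binary (vector_rep binary)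

-- ===== LEMMAS AND PROOFS =====

-- one-hot vector of length n with the 1 at position i (i < n), in decomposed form
def pvOneHot (n i : Nat) : List Int := List.replicate i 0 ++ 1 :: List.replicate (n - i - 1) 0

-- the per-character bit both programs branch on (loop characters: anything but '0' counts as 1)
def pvBit (c : Char) : Nat := if c = '0' then 0 else 1

-- the first character's bit (both programs test it against '1')
def pvBit0 (c : Char) : Nat := if c = '1' then 1 else 0

theorem pvTensor_pair (v : List Int) (a b : Int) :
    pvTensor v [a, b] = v.flatMap (fun x => [x * a, x * b]) := by
  induction v using List.reverseRecOn with
  | nil => rfl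
  | append_singleton xs x ih =>
      simp [pvTensor, List.foldl_append] at ih ⊢
      simp [ih]

theorem pvRepL (k : Nat) :
    List.flatMap (fun x : Int => [x, 0]) (List.replicate k 0) = List.replicate (2 * k) 0 := by
  induction k with
  | zero => rfl
  | succ k ih => rw [show 2*(k+1) = (2*k)+1+1 by omega]; simp [List.replicate_succ, ih]

theorem pvRepR (k : Nat) :
    List.flatMap (fun x : Int => [0, x]) (List.replicate k 0) = List.replicate (2 * k) 0 := by
  induction k with
  | zero => rfl
  | succ k ih => rw [show 2*(k+1) = (2*k)+1+1 by omega]; simp [List.replicate_succ, ih]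

-- one step of A's loop sends a one-hot vector to the doubled one-hot vector
theorem pvTensor_oneHot (n i : Nat) (h : i < n) (c : Char) :
    (if c = '0' then pvTensor (pvOneHot n i) [1, 0]
      else pvTensor (pvOneHot n i) [0, 1]) = pvOneHot (2 * n) (2 * i + pvBit c) := by
  by_cases hc : c = '0'
  · simp [hc, pvBit, pvTensor_pair, pvOneHot, List.flatMap_append, List.flatMap_cons,
      pvRepL, show 2*n - 2*i - 1 = 2*(n-i-1) + 1 by omega, List.replicate_succ]
  · simp [hc, pvBit, pvTensor_pair, pvOneHot, List.flatMap_append, List.flatMap_cons,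
      pvRepR, show 2*n - (2*i+1) - 1 = 2*(n-i-1) by omega]
    rw [show (2*i+1) = (2*i)+1 from rfl, List.replicate_succ']
    simp

-- loop invariant: A's fold preserves one-hot form, the index evolving as B's arithmetic fold
theorem pvLoop (cs : List Char) (n i : Nat) (h : i < n) :
    cs.foldl (fun result c =>
        if c = '0' then pvTensor result [1, 0] else pvTensor result [0, 1])
      (pvOneHot n i) =
      pvOneHot (n * 2 ^ cs.length) (cs.foldl (fun idx c => 2 * idx + pvBit c) i) ∧
    cs.foldl (fun idx c => 2 * idx + pvBit c) i < n * 2 ^ cs.length := by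
  induction cs generalizing n i with
  | nil => simp [h]
  | cons c cs ih =>
      have hb : 2 * i + pvBit c < 2 * n := by
        have : pvBit c ≤ 1 := by unfold pvBit; split <;> omega
        omega
      have := ih (2 * n) (2 * i + pvBit c) hb
      have hpow : 2 * n * 2 ^ cs.length = n * 2 ^ (cs.length + 1) := by ring
      simp only [List.foldl_cons, pvTensor_oneHot n i h c]
      rw [hpow] at this
      simpa using this

-- B's Int fold is the cast of the Nat index fold
theorem pvFold_cast (cs : List Char) (i : Nat) :
    cs.foldl (fun idx c => 2 * idx + (if c = '0' then (0 : Int) else 1)) (i : Int) =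
      ((cs.foldl (fun idx c => 2 * idx + pvBit c) i : Nat) : Int) := by
  induction cs generalizing i with
  | nil => rfl
  | cons c cs ih =>
      simp only [List.foldl_cons]
      by_cases hc : c = '0'
      · simpa [hc, pvBit] using ih (2 * i)
      · have h1 : 2 * (i : Int) + (if c = '0' then (0 : Int) else 1)
            = ((2 * i + pvBit c : Nat) : Int) := by
          simp [hc, pvBit]
        rw [h1]
        exact ih _

-- replicate-then-set equals the decomposed one-hot
theorem pvSet_replicate (n i : Nat) (h : i < n) :
    (List.replicate n (0 : Int)).set i 1 = pvOneHot n i := by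
  rw [List.set_eq_take_append_cons_drop]
  simp [h, pvOneHot, List.take_replicate, List.drop_replicate]
  rw [Nat.min_eq_left h.le, show n - (i + 1) = n - i - 1 by omega]

-- ===== VERDICT (by name: the statement is the Claim_ definition above) =====
theorem vector_rep_spec : Claim_equal_vector_rep := by
  intro binary _ hpre
  have hcs : binary.toList ≠ [] := by
    simpa [String.toList_eq_nil_iff] using hpre
  obtain ⟨c, cs, hEq⟩ := List.exists_cons_of_ne_nil hcs
  show vector_rep binary = vector_rep_alt binary
  unfold vector_rep vector_rep_alt
  simp only [hEq]
  rw [show PySem.Chars.len (c :: cs) = ((c :: cs).length : Int) by simp,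
    PySem.List.foldl_pyRange_pyGetD' (c :: cs) ' '
      (fun result ch =>
        if ch = '0' then pvTensor result [1, 0] else pvTensor result [0, 1])
      _ (by omega)]
  simp only [PySem.List.pyGetD_zero_cons, PySem.List.slice_from_one, Int.toNat_one,
    List.drop_succ_cons, List.drop_zero, List.tail_cons]
  have hinit : (if c = '1' then ([0, 1] : List Int) else [1, 0]) = pvOneHot 2 (pvBit0 c) := by
    by_cases hc1 : c = '1' <;> simp [hc1, pvBit0, pvOneHot]
  have hinit' : (if c = '1' then (1 : Int) else 0) = ((pvBit0 c : Nat) : Int) := by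
    by_cases hc1 : c = '1' <;> simp [hc1, pvBit0]
  rw [hinit, hinit', pvFold_cast,
    PySem.List.pySetD_of_nonneg _ _ (by positivity), Int.toNat_natCast]
  have hloop := pvLoop cs 2 (pvBit0 c) (by unfold pvBit0; split <;> omega)
  rw [hloop.1, pvSet_replicate _ _ (by
    have := hloop.2
    simpa [List.length_cons, pow_succ, Nat.mul_comm] using this)]
  congr 1
  simp [List.length_cons, pow_succ]
  ring
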